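-- pv_equiv track=rewrite | github.com/Joel7homas/container-backup | file_backup.py | _is_system_directory
-- ===== SOURCE A (Python) =====
-- def _is_system_directory(path: str) -> bool:
--     """
--     Check if a path is a system directory that should be excluded.
--
--     Args:
--         path (str): Path to check.
--
--     Returns:
--         bool: True if system directory, False otherwise.
--     """
--     system_dirs = [
--         "/proc", "/sys", "/dev", "/run", "/var/run",
--         "/var/lock", "/tmp", "/var/tmp", "/var/cache",
--         "/etc/hostname", "/etc/hosts", "/etc/resolv.conf",
--         "/mnt/media", "/media", "/backups", "/mnt/backups"
--     ]
--
--     return any(path == sys_dir or path.startswith(sys_dir + "/") for sys_dir in system_dirs)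
-- ===== SOURCE B (Python) =====
-- _SYSTEM_DIRS = frozenset([
--     "/proc", "/sys", "/dev", "/run", "/var/run",
--     "/var/lock", "/tmp", "/var/tmp", "/var/cache",
--     "/etc/hostname", "/etc/hosts", "/etc/resolv.conf",
--     "/mnt/media", "/media", "/backups", "/mnt/backups"
-- ])
--
--
-- def _is_system_directory(path: str) -> bool:
--     """True iff path is a system directory or lies under one.
--
--     Walks up the ancestor chain: test the path itself, then repeatedly cut
--     it at its last '/' and test again, until no slash remains.
--     """
--     p = path
--     while True:
--         if p in _SYSTEM_DIRS:
--             return True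
--         i = p.rfind('/')
--         if i < 0:
--             return False
--         p = p[:i]
-- ===== Notes on version B (the rewrite author's own statement) =====
-- stated objective: idiomatic
-- what changed: Instead of scanning the directory list testing == / startswith per entry, B precomputes the directories as a frozenset and walks up the path's ancestor chain (cutting at the last '/' each step), doing one O(1) expected set lookup per ancestor.
import Mathlib
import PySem

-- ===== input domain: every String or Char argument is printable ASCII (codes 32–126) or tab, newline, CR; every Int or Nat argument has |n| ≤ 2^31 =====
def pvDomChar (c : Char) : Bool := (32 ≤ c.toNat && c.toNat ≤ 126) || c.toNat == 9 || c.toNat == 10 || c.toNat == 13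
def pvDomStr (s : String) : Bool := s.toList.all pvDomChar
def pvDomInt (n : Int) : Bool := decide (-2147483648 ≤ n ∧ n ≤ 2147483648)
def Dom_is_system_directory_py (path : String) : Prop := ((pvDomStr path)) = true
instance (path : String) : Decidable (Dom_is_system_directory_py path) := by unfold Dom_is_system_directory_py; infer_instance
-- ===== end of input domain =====

-- B replaces A's list scan with == / startswith by a precomputed frozenset probed while
-- walking up the path's ancestor chain (cut at the last '/' each step) — idiomatic.

-- ===== PORT A =====
-- A's local list `system_dirs`
def sysDirsA : List String :=
  ["/proc", "/sys", "/dev", "/run", "/var/run",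
   "/var/lock", "/tmp", "/var/tmp", "/var/cache",
   "/etc/hostname", "/etc/hosts", "/etc/resolv.conf",
   "/mnt/media", "/media", "/backups", "/mnt/backups"]

def is_system_directory_py (path : String) : Bool :=
  sysDirsA.any (fun sys_dir => path == sys_dir || PySem.Str.startswith path (sys_dir ++ "/"))

-- ===== PORT B =====
-- B's module-level frozenset `_SYSTEM_DIRS`
def sysDirsB : PySem.Set String :=
  PySem.Set.ofList
    ["/proc", "/sys", "/dev", "/run", "/var/run",
     "/var/lock", "/tmp", "/var/tmp", "/var/cache",
     "/etc/hostname", "/etc/hosts", "/etc/resolv.conf",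
     "/mnt/media", "/media", "/backups", "/mnt/backups"]

-- Python's p.rfind('/'): index of the LAST '/', as `some i` (Python's -1 becomes none).
-- Computed as the first '/' of the reversed character list.
def rfindSlash? (L : List Char) : Option Nat :=
  match L.reverse.findIdx? (· == '/') with
  | none => none
  | some j => some (L.length - 1 - j)

theorem rfindSlash?_lt {L : List Char} {i : Nat} (h : rfindSlash? L = some i) :
    i < L.length := by
  unfold rfindSlash? at h
  cases hj : L.reverse.findIdx? (· == '/') with
  | none => rw [hj] at h; simp at h
  | some j =>
    rw [hj] at h
    have := (List.findIdx?_eq_some_iff_findIdx_eq.mp hj).1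
    simp only [List.length_reverse] at this
    simp only [Option.some.injEq] at h
    omega

-- B's while-loop: test the current prefix, then cut at its last slash.
def bWalk (L : List Char) : Bool :=
  if PySem.Set.contains sysDirsB (String.ofList L) then true
  else
    match _h : rfindSlash? L with
    | none => false
    | some i => bWalk (L.take i)
termination_by L.length
decreasing_by
  have := rfindSlash?_lt _h
  simp only [List.length_take]
  omega

def is_system_directory_py_alt (path : String) : Bool :=
  bWalk path.toList

-- ===== PRECONDITION & SPEC =====
def Spec_is_system_directory_py (path : String) (out : Bool) : Prop := out = is_system_directory_py_alt path
instance (path : String) (out : Bool) : Decidable (Spec_is_system_directory_py path out) := by unfold Spec_is_system_directory_py; infer_instance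

-- ===== CLAIM (what is proved, stated in full; the proofs are below) =====
def Claim_equal_is_system_directory_py : Prop := ∀ (path : String), Dom_is_system_directory_py path → Spec_is_system_directory_py path (is_system_directory_py path)

-- ===== LEMMAS AND PROOFS =====

-- the common characterisation both programs are reduced to
def hitP (L : List Char) : Prop :=
  (∃ d ∈ sysDirsA, L = d.toList) ∨
  (∃ (k : Nat) (_ : k < L.length),
    L[k] = '/' ∧ ∃ d ∈ sysDirsA, L.take k = d.toList)

-- startswith (d + "/") cuts exactly at a slash position: characterisation by a take
theorem startswith_slash_iff (D L : List Char) :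
    PySem.Chars.startswith L (D ++ ['/']) = true ↔
      ∃ (k : Nat) (h : k < L.length), L[k] = '/' ∧ L.take k = D := by
  rw [PySem.Chars.startswith_iff]
  constructor
  · rintro ⟨t, ht⟩
    subst ht
    refine ⟨D.length, by simp, by simp, by simp⟩
  · rintro ⟨k, h, hc, ht⟩
    refine ⟨L.drop (k+1), ?_⟩
    have h2 : L.drop k = '/' :: L.drop (k+1) := by rw [List.drop_eq_getElem_cons h, hc]
    have h1 := List.take_append_drop k L
    rw [h2, ht] at h1
    simpa using h1

-- membership in B's frozenset is membership in A's list
theorem set_mem_iff (s : String) :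
    PySem.Set.contains sysDirsB s = true ↔ ∃ d ∈ sysDirsA, s.toList = d.toList := by
  have hBA : sysDirsB = PySem.Set.ofList sysDirsA := rfl
  rw [hBA, PySem.Set.contains_iff, PySem.Set.mem_ofList]
  constructor
  · intro hs; exact ⟨s, hs, rfl⟩
  · rintro ⟨d, hd, h⟩
    rwa [show s = d from String.ext_iff.mpr h]

theorem a_iff (path : String) : is_system_directory_py path = true ↔ hitP path.toList := by
  simp only [is_system_directory_py, hitP, List.any_eq_true, Bool.or_eq_true, beq_iff_eq,
    PySem.Str.startswith_eq, String.toList_append]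
  constructor
  · rintro ⟨d, hd, h | h⟩
    · exact Or.inl ⟨d, hd, by rw [h]⟩
    · rw [show ("/" : String).toList = ['/'] from rfl] at h
      obtain ⟨k, hk, hc, ht⟩ := (startswith_slash_iff d.toList path.toList).mp h
      exact Or.inr ⟨k, hk, hc, d, hd, ht⟩
  · rintro (⟨d, hd, h⟩ | ⟨k, hk, hc, d, hd, ht⟩)
    · exact ⟨d, hd, Or.inl (String.ext_iff.mpr h)⟩
    · refine ⟨d, hd, Or.inr ?_⟩
      rw [show ("/" : String).toList = ['/'] from rfl]
      exact (startswith_slash_iff d.toList path.toList).mpr ⟨k, hk, hc, ht⟩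

-- full specification of rfindSlash?: the index is a slash and is the last one
theorem rfindSlash?_none_iff {L : List Char} :
    rfindSlash? L = none ↔ ∀ k (h : k < L.length), L[k] ≠ '/' := by
  unfold rfindSlash?
  cases hj : L.reverse.findIdx? (· == '/') with
  | none =>
    simp only [true_iff]
    rw [List.findIdx?_eq_none_iff] at hj
    intro k hk hc
    have hmem : L[k] ∈ L.reverse := List.mem_reverse.mpr (List.getElem_mem hk)
    have := hj _ hmem
    simp [hc] at this
  | some j =>
    simp only [reduceCtorEq, false_iff]
    obtain ⟨hjl, hfi⟩ := List.findIdx?_eq_some_iff_findIdx_eq.mp hj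
    simp only [List.length_reverse] at hjl
    have h1 := List.findIdx_getElem (p := (· == '/')) (xs := L.reverse)
      (w := by rw [hfi]; simpa using hjl)
    simp only [hfi, List.getElem_reverse, beq_iff_eq] at h1
    intro hall
    exact hall (L.length - 1 - j) (by omega) h1

theorem rfindSlash?_some_spec {L : List Char} {i : Nat} (h : rfindSlash? L = some i) :
    ∃ (hi : i < L.length), L[i] = '/' ∧ ∀ k (hk : k < L.length), L[k] = '/' → k ≤ i := by
  unfold rfindSlash? at h
  cases hj : L.reverse.findIdx? (· == '/') with
  | none => rw [hj] at h; simp at h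
  | some j =>
    rw [hj] at h
    simp only [Option.some.injEq] at h
    obtain ⟨hjl, hfi⟩ := List.findIdx?_eq_some_iff_findIdx_eq.mp hj
    simp only [List.length_reverse] at hjl
    have hi : i < L.length := by omega
    have h1 := List.findIdx_getElem (p := (· == '/')) (xs := L.reverse)
      (w := by rw [hfi]; simpa using hjl)
    simp only [hfi, List.getElem_reverse, beq_iff_eq] at h1
    refine ⟨hi, ?_, ?_⟩
    · have heq : L.length - 1 - j = i := by omega
      simp only [heq] at h1; exact h1
    · intro k hk hc
      by_contra hik
      push Not at hik
      have h2 := List.not_of_lt_findIdx (p := (· == '/')) (xs := L.reverse)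
        (i := L.length - 1 - k) (by rw [hfi]; omega)
      simp only [List.getElem_reverse] at h2
      have hkk : L.length - 1 - (L.length - 1 - k) = k := by omega
      simp only [hkk, hc] at h2
      simp at h2

-- cutting at the last slash preserves hitP for a prefix not itself in the set
theorem hitP_cut {L : List Char} {m : Nat} (hm : rfindSlash? L = some m)
    (hnot : ¬ (∃ d ∈ sysDirsA, L = d.toList)) :
    (hitP L ↔ hitP (L.take m)) := by
  obtain ⟨hml, hslash, hlast⟩ := rfindSlash?_some_spec hm
  have hlen : (L.take m).length = m := by simp; omega
  constructor
  · rintro (hL | ⟨k, hk, hc, d, hd, ht⟩)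
    · exact absurd hL hnot
    · have hkm : k ≤ m := hlast k hk hc
      rcases Nat.lt_or_ge k m with hlt | hge
      · refine Or.inr ⟨k, by omega, ?_, d, hd, ?_⟩
        · rw [List.getElem_take]; exact hc
        · rw [List.take_take]; simpa [Nat.min_eq_left (le_of_lt hlt)] using ht
      · have : k = m := le_antisymm hkm hge
        subst this
        exact Or.inl ⟨d, hd, ht⟩
  · rintro (⟨d, hd, ht⟩ | ⟨k, hk, hc, d, hd, ht⟩)
    · exact Or.inr ⟨m, hml, hslash, d, hd, ht⟩
    · rw [hlen] at hk
      refine Or.inr ⟨k, by omega, ?_, d, hd, ?_⟩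
      · rw [List.getElem_take] at hc; exact hc
      · rw [List.take_take] at ht; simpa [Nat.min_eq_left (le_of_lt hk)] using ht

theorem bWalk_iff (L : List Char) : bWalk L = true ↔ hitP L := by
  induction L using bWalk.induct with
  | case1 L hmem =>
    rw [bWalk, if_pos hmem]
    simp only [true_iff]
    have := (set_mem_iff (String.ofList L)).mp hmem
    simp only [String.toList_ofList] at this
    exact Or.inl this
  | case2 L hmem hnone =>
    rw [bWalk, if_neg hmem, hnone]
    have hnoslash := rfindSlash?_none_iff.mp hnone
    have hnot : ¬ (∃ d ∈ sysDirsA, L = d.toList) := by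
      intro hL
      exact hmem ((set_mem_iff (String.ofList L)).mpr (by simpa using hL))
    apply iff_of_false (by simp)
    rintro (hL | ⟨k, hk, hc, _⟩)
    · exact hnot hL
    · exact hnoslash k hk hc
  | case3 L hmem i hsome ih =>
    rw [bWalk, if_neg hmem, hsome]
    have hnot : ¬ (∃ d ∈ sysDirsA, L = d.toList) := by
      intro hL
      exact hmem ((set_mem_iff (String.ofList L)).mpr (by simpa using hL))
    rw [ih, hitP_cut hsome hnot]

theorem main_eq (path : String) : is_system_directory_py path = is_system_directory_py_alt path := by
  rw [Bool.eq_iff_iff, a_iff, is_system_directory_py_alt, bWalk_iff]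

-- ===== VERDICT (by name: the statement is the Claim_ definition above) =====
theorem is_system_directory_py_spec : Claim_equal_is_system_directory_py := by
  intro path _
  unfold Spec_is_system_directory_py
  exact main_eq path
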